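-- pv_equiv track=rewrite | github.com/Ammoniya/experiments | trace_heuristics.py | _stack_is_benign
-- ===== SOURCE A (Python) =====
-- BENIGN_STACK_SIGNATURES = (
--     "react-dom",
--     "webpack",
--     "jquery",
--     "vue.runtime",
--     "angular",
--     "svelte",
--     "/node_modules/",
-- )
--
-- def _stack_is_benign(stack: str) -> bool:
--     if not stack:
--         return False
--     lowered = stack.lower()
--     if any(signature in lowered for signature in BENIGN_STACK_SIGNATURES):
--         return True
--     frames = [line for line in stack.splitlines() if line.strip()]
--     return len(frames) >= 4
-- ===== SOURCE B (Python) =====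
-- BENIGN_STACK_SIGNATURES = (
--     "react-dom",
--     "webpack",
--     "jquery",
--     "vue.runtime",
--     "angular",
--     "svelte",
--     "/node_modules/",
-- )
--
-- def _stack_is_benign(stack: str) -> bool:
--     # One pass over the lines: test signatures per lowered line (signatures
--     # contain no line breaks, so this matches the full-string search) and
--     # count non-blank frames along the way, with an early exit on a match.
--     if not stack:
--         return False
--     frames = 0
--     for line in stack.splitlines():
--         low = line.lower()
--         if any(sig in low for sig in BENIGN_STACK_SIGNATURES):
--             return True
--         if line.strip():
--             frames += 1
--     return frames >= 4
-- ===== Notes on version B (the rewrite author's own statement) =====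
-- stated objective: alternative
-- what changed: A makes three separate passes (signature search over the whole lowered string, splitlines, filter+count of non-blank lines); B makes a single pass over stack.splitlines(), testing the signatures against each lowered line with an early exit and counting non-blank frames in the same loop (valid because no signature contains a line break).
import Mathlib
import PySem

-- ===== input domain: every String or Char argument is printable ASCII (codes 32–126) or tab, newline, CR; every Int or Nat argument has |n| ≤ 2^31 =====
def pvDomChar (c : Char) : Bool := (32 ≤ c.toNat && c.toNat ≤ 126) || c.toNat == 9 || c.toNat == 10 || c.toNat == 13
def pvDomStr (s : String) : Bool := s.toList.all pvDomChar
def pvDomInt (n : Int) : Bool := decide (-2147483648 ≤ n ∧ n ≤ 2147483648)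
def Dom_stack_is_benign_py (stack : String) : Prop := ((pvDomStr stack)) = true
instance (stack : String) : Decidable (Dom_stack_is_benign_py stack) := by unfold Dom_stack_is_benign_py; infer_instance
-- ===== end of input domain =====

-- B fuses A's three passes (signature search on the whole lowered string, splitlines,
-- filter+count) into one pass over the lines with an early exit on a signature match;
-- objective: alternative decomposition (same asymptotic cost).

-- the module constant BENIGN_STACK_SIGNATURES (shared by both sources)
def pvSigs : List String :=
  ["react-dom", "webpack", "jquery", "vue.runtime", "angular", "svelte", "/node_modules/"]

-- ===== PORT A =====
def stack_is_benign_py (stack : String) : Bool :=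
  if stack = "" then false
  else
    let lowered := PySem.Str.lower stack
    if pvSigs.any (fun signature => PySem.Str.isIn signature lowered) then true
    else
      let frames := (PySem.Str.splitlines stack).filter
        (fun line => decide (PySem.Str.strip line ≠ ""))
      decide (4 ≤ frames.length)

-- ===== PORT B =====
def pvBenignLoop : List String → Nat → Bool
  | [], frames => decide (4 ≤ frames)
  | line :: rest, frames =>
    let low := PySem.Str.lower line
    if pvSigs.any (fun sig => PySem.Str.isIn sig low) then true
    else pvBenignLoop rest (if PySem.Str.strip line ≠ "" then frames + 1 else frames)

def stack_is_benign_py_alt (stack : String) : Bool :=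
  if stack = "" then false
  else pvBenignLoop (PySem.Str.splitlines stack) 0

-- ===== PRECONDITION & SPEC =====
def Spec_stack_is_benign_py (stack : String) (out : Bool) : Prop := out = stack_is_benign_py_alt stack
instance (stack : String) (out : Bool) : Decidable (Spec_stack_is_benign_py stack out) := by unfold Spec_stack_is_benign_py; infer_instance

-- ===== CLAIM (what is proved, stated in full; the proofs are below) =====
def Claim_equal_stack_is_benign_py : Prop := ∀ (stack : String), Dom_stack_is_benign_py stack → Spec_stack_is_benign_py stack (stack_is_benign_py stack)

-- ===== LEMMAS AND PROOFS =====

-- Python's splitlines boundary predicate (exactly the one inside PySem.Chars.splitlines)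
def pvIsB (c : Char) : Bool :=
  decide (c.toNat = 10) || decide (c.toNat = 13) || decide (c.toNat = 11) ||
  decide (c.toNat = 12) || decide (c.toNat = 28) || decide (c.toNat = 29) ||
  decide (c.toNat = 30) || decide (c.toNat = 133) || decide (c.toNat = 8232) ||
  decide (c.toNat = 8233)

-- structural mirror of PySem.Chars.splitlines.go (for its functional induction principle)
def pvGo (s cur : List Char) (acc : List (List Char)) : List (List Char) :=
  match s with
  | [] => if cur.isEmpty then acc.reverse else (cur.reverse :: acc).reverse
  | '\x0d' :: '\n' :: rest => pvGo rest [] (cur.reverse :: acc)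
  | c :: rest => if pvIsB c then pvGo rest [] (cur.reverse :: acc) else pvGo rest (c :: cur) acc

theorem pvGo_cons (c : Char) (rest cur : List Char) (acc : List (List Char))
    (hne : ∀ r, c = '\x0d' → rest = '\n' :: r → False) :
    pvGo (c :: rest) cur acc =
      if pvIsB c then pvGo rest [] (cur.reverse :: acc) else pvGo rest (c :: cur) acc := by
  rw [pvGo]
  exact hne

theorem goP_cons (c : Char) (rest cur : List Char) (acc : List (List Char))
    (hne : ∀ r, c = '\x0d' → rest = '\n' :: r → False) :
    PySem.Chars.splitlines.go pvIsB (c :: rest) cur acc =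
      if pvIsB c then PySem.Chars.splitlines.go pvIsB rest [] (cur.reverse :: acc)
      else PySem.Chars.splitlines.go pvIsB rest (c :: cur) acc := by
  rw [PySem.Chars.splitlines.go]
  exact hne

theorem pvGo_eq (s cur : List Char) (acc : List (List Char)) :
    PySem.Chars.splitlines.go pvIsB s cur acc = pvGo s cur acc := by
  induction s, cur, acc using pvGo.induct with
  | case1 cur acc h => simp [PySem.Chars.splitlines.go, pvGo, h]
  | case2 cur acc h => simp [PySem.Chars.splitlines.go, pvGo, h]
  | case3 cur acc rest ih => simpa [PySem.Chars.splitlines.go, pvGo] using ih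
  | case4 cur acc c rest hne hb ih =>
      rw [goP_cons c rest cur acc hne, pvGo_cons c rest cur acc hne]; simp [hb, ih]
  | case5 cur acc c rest hne hb ih =>
      rw [goP_cons c rest cur acc hne, pvGo_cons c rest cur acc hne]; simp [hb, ih]

theorem splitlines_eq_pvGo (s : List Char) : PySem.Chars.splitlines s = pvGo s [] [] := by
  rw [PySem.Chars.splitlines]; exact pvGo_eq s [] []

-- accumulated lines survive into the result
theorem mem_pvGo_of_mem_acc (s cur : List Char) (acc : List (List Char)) (l : List Char)
    (h : l ∈ acc) : l ∈ pvGo s cur acc := by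
  revert h
  induction s, cur, acc using pvGo.induct with
  | case1 cur acc hc => intro h; simp [pvGo, hc, h]
  | case2 cur acc hc => intro h; rw [pvGo, if_neg hc]; simp [h]
  | case3 cur acc rest ih => intro h; rw [pvGo]; exact ih (List.mem_cons_of_mem _ h)
  | case4 cur acc c rest hne hb ih =>
      intro h; rw [pvGo_cons c rest cur acc hne, if_pos hb]
      exact ih (List.mem_cons_of_mem _ h)
  | case5 cur acc c rest hne hb ih =>
      intro h; rw [pvGo_cons c rest cur acc hne, if_neg hb]; exact ih h

-- every produced line is an infix of the remaining input (or came from acc)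
theorem pvGo_line_infix (s cur : List Char) (acc : List (List Char)) (l : List Char)
    (h : l ∈ pvGo s cur acc) : l ∈ acc ∨ l <:+: (cur.reverse ++ s) := by
  revert h
  induction s, cur, acc using pvGo.induct with
  | case1 cur acc hc => intro h; rw [pvGo, if_pos hc] at h; left; simpa using h
  | case2 cur acc hc =>
      intro h; rw [pvGo, if_neg hc] at h
      simp only [List.mem_reverse, List.mem_cons] at h
      rcases h with rfl | h
      · right; simp
      · left; exact h
  | case3 cur acc rest ih =>
      intro h; rw [pvGo] at h
      rcases ih h with h' | h'
      · rcases List.mem_cons.mp h' with rfl | hm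
        · right; exact (List.prefix_append _ _).isInfix
        · left; exact hm
      · right
        refine List.IsInfix.trans (by simpa using h') ?_
        exact List.IsSuffix.isInfix ⟨cur.reverse ++ ['\x0d', '\n'], by simp⟩
  | case4 cur acc c rest hne hb ih =>
      intro h; rw [pvGo_cons c rest cur acc hne, if_pos hb] at h
      rcases ih h with h' | h'
      · rcases List.mem_cons.mp h' with rfl | hm
        · right; exact (List.prefix_append _ _).isInfix
        · left; exact hm
      · right
        refine List.IsInfix.trans (by simpa using h') ?_
        exact List.IsSuffix.isInfix ⟨cur.reverse ++ [c], by simp⟩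
  | case5 cur acc c rest hne hb ih =>
      intro h; rw [pvGo_cons c rest cur acc hne, if_neg hb] at h
      rcases ih h with h' | h'
      · left; exact h'
      · right; simpa [List.append_assoc] using h' 


-- a prefix that avoids c stops before c
theorem prefix_split (sub as bs : List Char) (c : Char)
    (h : sub <+: as ++ c :: bs) (hc : c ∉ sub) : sub <+: as := by
  by_cases hl : sub.length ≤ as.length
  · exact List.prefix_of_prefix_length_le h (List.prefix_append _ _) hl
  · exfalso
    rw [Nat.not_le] at hl
    have hget := h.getElem (i := as.length) hl
    have hr : (as ++ c :: bs)[as.length]'(by simp) = c := by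
      rw [List.getElem_append_right (Nat.le_refl _)]; simp
    have hsc : sub[as.length]'hl = c := by rw [hget]; exact hr
    exact hc (hsc ▸ List.getElem_mem _)

-- an infix that avoids c lies wholly on one side of c
theorem infix_split (sub as bs : List Char) (c : Char)
    (h : sub <:+: as ++ c :: bs) (hc : c ∉ sub) : sub <:+: as ∨ sub <:+: bs := by
  have h' : ∃ j, sub <+: (as ++ c :: bs).drop j := by
    rw [PySem.Chars.exists_prefix_drop_iff_isIn, PySem.Chars.isIn_iff_infix]; exact h
  obtain ⟨j, hj⟩ := h'
  by_cases hle : j ≤ as.length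
  · rw [List.drop_append, Nat.sub_eq_zero_of_le hle, List.drop_zero] at hj
    left
    exact (prefix_split sub (as.drop j) bs c hj hc).isInfix.trans (List.drop_suffix j as).isInfix
  · right
    rw [Nat.not_le] at hle
    rw [List.drop_append, List.drop_eq_nil_of_le (Nat.le_of_lt hle), List.nil_append] at hj
    rw [show j - as.length = (j - as.length - 1) + 1 by omega, List.drop_succ_cons] at hj
    exact hj.isInfix.trans (List.drop_suffix _ bs).isInfix

-- an occurrence of a boundary-free pattern lies inside one produced line
theorem pvGo_occ (sub : List Char) (hsub : sub ≠ []) (hnb : ∀ c ∈ sub, pvIsB c = false)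
    (s cur : List Char) (acc : List (List Char)) (hcur : ∀ c ∈ cur, pvIsB c = false)
    (h : sub <:+: cur.reverse ++ s) : ∃ l ∈ pvGo s cur acc, sub <:+: l := by
  revert hcur h
  induction s, cur, acc using pvGo.induct with
  | case1 cur acc hc =>
      intro hcur h
      rw [List.isEmpty_iff] at hc
      subst hc
      simp only [List.reverse_nil, List.nil_append, List.infix_nil] at h
      exact absurd h hsub
  | case2 cur acc hc =>
      intro hcur h
      rw [pvGo, if_neg hc]
      exact ⟨cur.reverse, by simp, by simpa using h⟩
  | case3 cur acc rest ih =>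
      intro hcur h
      rw [pvGo]
      have hcr : '\x0d' ∉ sub := fun hm => absurd (hnb _ hm) (by decide)
      rcases infix_split sub cur.reverse ('\n' :: rest) '\x0d' h hcr with h1 | h2
      · exact ⟨cur.reverse, mem_pvGo_of_mem_acc _ _ _ _ (by simp), h1⟩
      · have hlf : '\n' ∉ sub := fun hm => absurd (hnb _ hm) (by decide)
        rcases infix_split sub [] rest '\n' (by simpa using h2) hlf with h3 | h4
        · exact absurd (by simpa using h3) hsub
        · exact ih (by simp) (by simpa using h4)
  | case4 cur acc c rest hne hb ih =>
      intro hcur h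
      rw [pvGo_cons c rest cur acc hne, if_pos hb]
      have hcS : c ∉ sub := fun hm => by rw [hnb _ hm] at hb; exact Bool.false_ne_true hb
      rcases infix_split sub cur.reverse rest c h hcS with h1 | h2
      · exact ⟨cur.reverse, mem_pvGo_of_mem_acc _ _ _ _ (by simp), h1⟩
      · exact ih (by simp) (by simpa using h2)
  | case5 cur acc c rest hne hb ih =>
      intro hcur h
      rw [pvGo_cons c rest cur acc hne, if_neg hb]
      have hb' : pvIsB c = false := by simpa using hb
      refine ih ?_ ?_
      · intro c' hc'
        rcases List.mem_cons.mp hc' with rfl | hmem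
        · exact hb'
        · exact hcur c' hmem
      · simpa [List.append_assoc] using h

theorem pvChar_upper_bounds (c : Char) (hu : PySem.Chars.isupper c = true) :
    65 ≤ c.toNat ∧ c.toNat ≤ 90 := by
  unfold PySem.Chars.isupper at hu
  simp only [Bool.and_eq_true, decide_eq_true_eq] at hu
  obtain ⟨h1, h2⟩ := hu
  rw [Char.le_def] at h1 h2
  exact ⟨h1, h2⟩

theorem pvToNat_lowerChar_upper (c : Char) (hu : PySem.Chars.isupper c = true) :
    (PySem.Chars.lowerChar c).toNat = c.toNat + 32 := by
  obtain ⟨h1, h2⟩ := pvChar_upper_bounds c hu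
  unfold PySem.Chars.lowerChar
  rw [if_pos hu, Char.toNat_ofNat, if_pos (Or.inl (by omega))]

theorem pvIsB_lowerChar (c : Char) : pvIsB (PySem.Chars.lowerChar c) = pvIsB c := by
  by_cases hu : PySem.Chars.isupper c = true
  · obtain ⟨h1, h2⟩ := pvChar_upper_bounds c hu
    have ht := pvToNat_lowerChar_upper c hu
    have e1 : pvIsB (PySem.Chars.lowerChar c) = false := by
      simp only [pvIsB, ht, Bool.or_eq_false_iff, decide_eq_false_iff_not]
      omega
    have e2 : pvIsB c = false := by
      simp only [pvIsB, Bool.or_eq_false_iff, decide_eq_false_iff_not]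
      omega
    rw [e1, e2]
  · unfold PySem.Chars.lowerChar
    rw [if_neg hu]

theorem lowerChar_low (c : Char) (n : Nat) (hn : n < 65) :
    PySem.Chars.lowerChar c = Char.ofNat n ↔ c = Char.ofNat n := by
  by_cases hu : PySem.Chars.isupper c = true
  · obtain ⟨h1, h2⟩ := pvChar_upper_bounds c hu
    have ht := pvToNat_lowerChar_upper c hu
    constructor <;> intro h
    · exfalso
      have := congrArg Char.toNat h
      rw [ht, Char.toNat_ofNat, if_pos (Or.inl (by omega))] at this
      omega
    · exfalso
      have := congrArg Char.toNat h
      rw [Char.toNat_ofNat, if_pos (Or.inl (by omega))] at this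
      omega
  · unfold PySem.Chars.lowerChar
    rw [if_neg hu]

theorem pvLowerNe (c : Char) (rest : List Char)
    (hne : ∀ r, c = '\x0d' → rest = '\n' :: r → False) :
    ∀ r, PySem.Chars.lowerChar c = '\x0d' →
      rest.map PySem.Chars.lowerChar = '\n' :: r → False := by
  intro r h1 h2
  have hc : c = '\x0d' := (lowerChar_low c 13 (by omega)).mp h1
  cases rest with
  | nil => simp at h2
  | cons d rest' =>
      rw [List.map_cons, List.cons.injEq] at h2
      have hd : d = '\n' := (lowerChar_low d 10 (by omega)).mp h2.1
      exact hne rest' hc (by rw [hd])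

-- lowering commutes with line splitting
theorem pvGo_lower (s cur : List Char) (acc : List (List Char)) :
    pvGo (s.map PySem.Chars.lowerChar) (cur.map PySem.Chars.lowerChar)
        (acc.map (List.map PySem.Chars.lowerChar)) =
      (pvGo s cur acc).map (List.map PySem.Chars.lowerChar) := by
  induction s, cur, acc using pvGo.induct with
  | case1 cur acc hc =>
      rw [List.map_nil, pvGo, pvGo, if_pos hc, if_pos (by simpa using hc)]
      simp [List.map_reverse]
  | case2 cur acc hc =>
      rw [List.map_nil, pvGo, pvGo, if_neg hc, if_neg (by simpa using hc)]
      simp [List.map_reverse]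
  | case3 cur acc rest ih =>
      have lcr : PySem.Chars.lowerChar '\x0d' = '\x0d' := by decide
      have lln : PySem.Chars.lowerChar '\n' = '\n' := by decide
      have hmap : ('\x0d' :: '\n' :: rest).map PySem.Chars.lowerChar =
          '\x0d' :: '\n' :: rest.map PySem.Chars.lowerChar := by
        rw [List.map_cons, List.map_cons, lcr, lln]
      rw [hmap, pvGo, pvGo]
      simpa [List.map_reverse] using ih
  | case4 cur acc c rest hne hb ih =>
      rw [List.map_cons, pvGo_cons _ _ _ _ (pvLowerNe c rest hne),
        pvGo_cons c rest cur acc hne, pvIsB_lowerChar, if_pos hb, if_pos hb]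
      simpa [List.map_reverse] using ih
  | case5 cur acc c rest hne hb ih =>
      rw [List.map_cons, pvGo_cons _ _ _ _ (pvLowerNe c rest hne),
        pvGo_cons c rest cur acc hne, pvIsB_lowerChar, if_neg hb, if_neg hb]
      exact ih

theorem splitlines_lower (cs : List Char) :
    PySem.Chars.splitlines (PySem.Chars.lower cs) =
      (PySem.Chars.splitlines cs).map PySem.Chars.lower := by
  rw [splitlines_eq_pvGo, splitlines_eq_pvGo]
  have := pvGo_lower cs [] []
  simpa [PySem.Chars.lower] using this

-- a boundary-free nonempty pattern occurs in a string iff it occurs in one of its lines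
theorem occ_iff (sub L : List Char) (hsub : sub ≠ []) (hnb : ∀ c ∈ sub, pvIsB c = false) :
    PySem.Chars.isIn sub L = (PySem.Chars.splitlines L).any (fun l => PySem.Chars.isIn sub l) := by
  rw [splitlines_eq_pvGo, Bool.eq_iff_iff]
  constructor
  · intro h
    rw [PySem.Chars.isIn_iff_infix] at h
    obtain ⟨l, hl, hinf⟩ := pvGo_occ sub hsub hnb L [] [] (by simp) (by simpa using h)
    rw [List.any_eq_true]
    exact ⟨l, hl, (PySem.Chars.isIn_iff_infix _ _).mpr hinf⟩
  · intro h
    rw [List.any_eq_true] at h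
    obtain ⟨l, hl, hIn⟩ := h
    rw [PySem.Chars.isIn_iff_infix] at hIn ⊢
    rcases pvGo_line_infix L [] [] l hl with h' | h'
    · exact absurd h' (List.not_mem_nil)
    · exact hIn.trans (by simpa using h')

-- per-signature: searching the lowered whole string = searching each lowered line
theorem sig_line_eq (sig : String) (hsub : sig.toList ≠ [])
    (hnb : ∀ c ∈ sig.toList, pvIsB c = false) (stack : String) :
    PySem.Str.isIn sig (PySem.Str.lower stack) =
      (PySem.Str.splitlines stack).any (fun l => PySem.Str.isIn sig (PySem.Str.lower l)) := by
  have hL : PySem.Str.isIn sig (PySem.Str.lower stack) =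
      PySem.Chars.isIn sig.toList (PySem.Chars.lower stack.toList) := by
    simp
  rw [hL, occ_iff _ _ hsub hnb, splitlines_lower, List.any_map]
  rw [PySem.Str.splitlines, List.any_map]
  simp only [Function.comp_def]
  congr 1
  funext l
  simp

-- the seven signatures are nonempty and contain no line-boundary character
theorem pvSigs_ok : ∀ sig ∈ pvSigs, sig.toList ≠ [] ∧ ∀ c ∈ sig.toList, pvIsB c = false := by
  intro sig hsm
  have hgen : sig.toList ≠ [] ∧ sig.toList.all (fun c => !pvIsB c) = true := by
    simp only [pvSigs, List.mem_cons, List.not_mem_nil, or_false] at hsm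
    rcases hsm with rfl | rfl | rfl | rfl | rfl | rfl | rfl <;> exact ⟨by decide, by decide⟩
  refine ⟨hgen.1, fun c hc => ?_⟩
  have := List.all_eq_true.mp hgen.2 c hc
  simpa using this

-- closed form of B's fused loop
theorem pvBenignLoop_eq (ls : List String) (frames : Nat) :
    pvBenignLoop ls frames =
      (ls.any (fun l => pvSigs.any (fun sig => PySem.Str.isIn sig (PySem.Str.lower l))) ||
        decide (4 ≤ frames + ls.countP (fun l => decide (PySem.Str.strip l ≠ "")))) := by
  induction ls generalizing frames with
  | nil => simp [pvBenignLoop]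
  | cons l rest ih =>
      rw [pvBenignLoop]
      by_cases hm : pvSigs.any (fun sig => PySem.Str.isIn sig (PySem.Str.lower l)) = true
      · rw [if_pos hm, List.any_cons, hm, Bool.true_or, Bool.true_or]
      · have hm' : pvSigs.any (fun sig => PySem.Str.isIn sig (PySem.Str.lower l)) = false :=
          Bool.eq_false_iff.mpr hm
        rw [if_neg hm, ih, List.any_cons, hm', Bool.false_or, List.countP_cons]
        by_cases hs : PySem.Str.strip l = ""
        · rw [if_neg (show ¬PySem.Str.strip l ≠ "" by simpa using hs),
            show decide (PySem.Str.strip l ≠ "") = false by simp [hs]]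
          simp
        · rw [if_pos hs, show decide (PySem.Str.strip l ≠ "") = true by simp [hs],
            if_pos rfl, Nat.add_assoc, Nat.add_comm 1]

-- ===== VERDICT (by name: the statement is the Claim_ definition above) =====
theorem stack_is_benign_py_spec : Claim_equal_stack_is_benign_py := by
  intro stack _
  unfold Spec_stack_is_benign_py
  by_cases h0 : stack = ""
  · simp [stack_is_benign_py, stack_is_benign_py_alt, h0]
  · simp only [stack_is_benign_py, stack_is_benign_py_alt]
    rw [if_neg h0, if_neg h0, pvBenignLoop_eq, Nat.zero_add, List.countP_eq_length_filter]
    have hsig : pvSigs.any (fun sig => PySem.Str.isIn sig (PySem.Str.lower stack)) =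
        (PySem.Str.splitlines stack).any
          (fun l => pvSigs.any (fun sig => PySem.Str.isIn sig (PySem.Str.lower l))) := by
      rw [Bool.eq_iff_iff]
      simp only [List.any_eq_true]
      constructor
      · rintro ⟨sig, hsm, hIn⟩
        rw [sig_line_eq sig (pvSigs_ok sig hsm).1 (pvSigs_ok sig hsm).2 stack,
          List.any_eq_true] at hIn
        obtain ⟨l, hl, hi⟩ := hIn
        exact ⟨l, hl, sig, hsm, hi⟩
      · rintro ⟨l, hl, sig, hsm, hi⟩
        refine ⟨sig, hsm, ?_⟩
        rw [sig_line_eq sig (pvSigs_ok sig hsm).1 (pvSigs_ok sig hsm).2 stack,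
          List.any_eq_true]
        exact ⟨l, hl, hi⟩
    by_cases hm : pvSigs.any (fun sig => PySem.Str.isIn sig (PySem.Str.lower stack)) = true
    · rw [if_pos hm, ← hsig, hm, Bool.true_or]
    · rw [if_neg hm, ← hsig]
      have hm' : pvSigs.any (fun sig => PySem.Str.isIn sig (PySem.Str.lower stack)) = false := by
        simpa using hm
      rw [hm', Bool.false_or]
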